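-- pv_equiv track=rewrite | github.com/maicondallagnol/Bioinfo | rep_finder.py | cria_combinacoes
-- ===== SOURCE A (Python) =====
-- def cria_combinacoes(dict_repeticoes):
--     """
--     Cria as combinações com base nas repetições encontradas
--     :param dict_repeticoes: dicionário com as repetições encontradas
--     :return: retorna dicionário com as combinações e os index de onde
--     a combinação veio (evita busca onde não existe a repetição)
--     """
--     lista_termos = list(dict_repeticoes.keys())
--     combinacoes = {}
--
--     # Itera todas as repetições encontradas na iteração anterior
--     for valor1 in lista_termos:
--         for valor2 in lista_termos:
--
--             # Se houver uma intersecçao quase total entre 2 repetiçoes coloca em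
--             # combinaçoes a junção das duas e os index onde uma das duas apareceu
--             # Ex:  "AAC" e "ACG" -> "AACG"
--             if valor1[1:] == valor2[:-1]:
--                 combinacoes.update({valor1 + valor2[-1]: sorted(
--                     set(list(dict_repeticoes[valor1].keys()) + list(dict_repeticoes[valor2].keys())))})
--
--     return combinacoes
-- ===== SOURCE B (Python) =====
-- def cria_combinacoes(dict_repeticoes):
--     """Staged pipeline: (1) bucket every term under its length-(L-1) prefix,
--     (2) build the flat list of (joined term, merged sorted index set) pairs by
--     looking each term's suffix up in that index, (3) one dict() constructor."""
--     por_prefixo = {}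
--     for t in dict_repeticoes:
--         por_prefixo.setdefault(t[:-1], []).append(t)
--     pares = [(valor1 + valor2[-1],
--               sorted(set(dict_repeticoes[valor1]) | set(dict_repeticoes[valor2])))
--              for valor1 in dict_repeticoes
--              for valor2 in por_prefixo.get(valor1[1:], [])]
--     return dict(pares)
-- ===== Notes on version B (the rewrite author's own statement) =====
-- stated objective: faster
-- what changed: Replaces the all-pairs quadratic scan by a prefix index (terms bucketed once under t[:-1], each suffix looked up directly), and builds the result as a flat comprehension of pairs fed to one dict() constructor instead of nested loops inserting into a dict.
import Mathlib
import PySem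

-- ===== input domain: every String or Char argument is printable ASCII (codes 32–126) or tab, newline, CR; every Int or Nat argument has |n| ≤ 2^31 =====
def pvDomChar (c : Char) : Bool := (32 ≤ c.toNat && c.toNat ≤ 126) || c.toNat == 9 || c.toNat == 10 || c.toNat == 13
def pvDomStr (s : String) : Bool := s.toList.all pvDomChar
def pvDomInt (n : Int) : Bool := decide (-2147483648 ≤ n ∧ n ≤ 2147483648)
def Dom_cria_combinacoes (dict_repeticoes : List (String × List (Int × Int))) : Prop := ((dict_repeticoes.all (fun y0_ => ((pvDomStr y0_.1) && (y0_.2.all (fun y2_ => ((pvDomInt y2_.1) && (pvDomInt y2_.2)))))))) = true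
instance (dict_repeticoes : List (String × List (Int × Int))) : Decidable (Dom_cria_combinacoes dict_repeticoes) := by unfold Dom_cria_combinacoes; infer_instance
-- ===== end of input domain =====

-- B replaces A's all-pairs nested-loop dict updates by a staged pipeline: a prefix index,
-- a flat comprehension of (key, value) pairs, and one dict() constructor; objective: faster.

-- the two slices both programs take:  t[:-1]  and  t[1:]
def pvPref (t : String) : List Char := PySem.Chars.slice t.toList none (some (-1))
def pvSuf (t : String) : List Char := PySem.Chars.slice t.toList (some 1) none

-- ===== PORT A =====
-- list(inner_dict.keys()) where the inner dict is given as its pair list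
def pvKeysA (v : List (Int × Int)) : List Int := PySem.List.dedup (v.map Prod.fst)
-- sorted(set(list(d[v1].keys()) + list(d[v2].keys()))); v1, v2 are keys of dr, so getD never sees its default
def pvValA (dr : PySem.Dict String (List (Int × Int))) (v1 v2 : String) : List Int :=
  PySem.List.sorted (PySem.Set.ofList (pvKeysA (dr.getD v1 []) ++ pvKeysA (dr.getD v2 []))) (fun x => x)

def cria_combinacoes (dict_repeticoes : List (String × List (Int × Int))) : List (String × List Int) :=
  let dr : PySem.Dict String (List (Int × Int)) := PySem.Dict.ofList dict_repeticoes
  let lista_termos := PySem.Dict.keys dr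
  (List.foldl (fun comb valor1 =>
      List.foldl (fun comb valor2 =>
        if pvSuf valor1 == pvPref valor2 then
          match PySem.Str.pyGet? valor2 (-1) with
          | some ch => comb.insert (String.ofList (valor1.toList ++ [ch])) (pvValA dr valor1 valor2)
          | none => comb   -- valor2[-1] raises IndexError in Python: excluded by Pre_
        else comb) comb lista_termos)
    (PySem.Dict.empty : PySem.Dict String (List Int)) lista_termos).items

-- ===== PORT B =====
-- sorted(set(d[v1]) | set(d[v2]))  (iterating a dict yields its keys)
def pvValB (dr : PySem.Dict String (List (Int × Int))) (v1 v2 : String) : List Int :=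
  PySem.List.sorted (PySem.Set.union (PySem.Set.ofList ((dr.getD v1 []).map Prod.fst))
    ((dr.getD v2 []).map Prod.fst)) (fun x => x)

def cria_combinacoes_alt (dict_repeticoes : List (String × List (Int × Int))) : List (String × List Int) :=
  let dr : PySem.Dict String (List (Int × Int)) := PySem.Dict.ofList dict_repeticoes
  let termos := PySem.Dict.keys dr
  -- por_prefixo.setdefault(t[:-1], []).append(t)  ==  modify (pvPref t) [] (· ++ [t])
  let porPrefixo : PySem.Dict (List Char) (List String) :=
    List.foldl (fun m t => m.modify (pvPref t) [] (fun x => x ++ [t])) PySem.Dict.empty termos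
  -- the flat comprehension of (valor1 + valor2[-1], merged indexes) pairs;
  -- valor2[-1] would raise IndexError on a zero-length key (excluded by Pre_): filterMap skips it
  let pares : List (String × List Int) :=
    termos.flatMap (fun v1 =>
      (porPrefixo.getD (pvSuf v1) []).filterMap (fun v2 =>
        (PySem.Str.pyGet? v2 (-1)).map (fun ch =>
          (String.ofList (v1.toList ++ [ch]), pvValB dr v1 v2))))
  (PySem.Dict.ofList pares).items

-- ===== PRECONDITION & SPEC =====
-- Pre_ excludes only inputs in which some key is a zero-length string: on those both Pythons
-- raise IndexError at valor2[-1] (such a key always overlaps itself), so A returns on all of Pre_.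
def Pre_cria_combinacoes (dict_repeticoes : List (String × List (Int × Int))) : Prop :=
  ∀ p ∈ dict_repeticoes, p.1 ≠ ""
instance (dict_repeticoes : List (String × List (Int × Int))) : Decidable (Pre_cria_combinacoes dict_repeticoes) := by unfold Pre_cria_combinacoes; infer_instance

def pvWitness_cria_combinacoes : (List (String × List (Int × Int))) :=
  [("AAC", [(0, 1), (5, 1)]), ("ACG", [(3, 2)])]

def Spec_cria_combinacoes (dict_repeticoes : List (String × List (Int × Int))) (out : List (String × List Int)) : Prop := out = cria_combinacoes_alt dict_repeticoes
instance (dict_repeticoes : List (String × List (Int × Int))) (out : List (String × List Int)) : Decidable (Spec_cria_combinacoes dict_repeticoes out) := by unfold Spec_cria_combinacoes; infer_instance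

-- ===== CLAIM (what is proved, stated in full; the proofs are below) =====
def Claim_equal_cria_combinacoes : Prop := ∀ (dict_repeticoes : List (String × List (Int × Int))), Dom_cria_combinacoes dict_repeticoes → Pre_cria_combinacoes dict_repeticoes → Spec_cria_combinacoes dict_repeticoes (cria_combinacoes dict_repeticoes)

-- ===== LEMMAS AND PROOFS =====

-- the two merged-index values agree: same set of inner-dict keys, sorted ascending
theorem pvVal_eq (dr : PySem.Dict String (List (Int × Int))) (v1 v2 : String) :
    pvValA dr v1 v2 = pvValB dr v1 v2 := by
  unfold pvValA pvValB
  rw [PySem.List.sorted_id_eq_sorted_id_iff_perm]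
  rw [List.perm_ext_iff_of_nodup (PySem.Set.nodup_ofList _)
    (PySem.Set.nodup_union _ _ (PySem.Set.nodup_ofList _))]
  intro a
  simp [PySem.Set.mem_union, PySem.Set.mem_ofList, pvKeysA]

-- the prefix index holds, under key p, exactly the terms whose pvPref is p, in order
theorem bucket_eq (termos : List String) (p : List Char) :
    (List.foldl (fun m t => m.modify (pvPref t) [] (fun x => x ++ [t]))
        (PySem.Dict.empty : PySem.Dict (List Char) (List String)) termos).getD p []
      = termos.filter (fun t => pvPref t == p) := by
  have h := PySem.Dict.getD_foldl_modify_append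
    (l := termos.map (fun t => (pvPref t, t)))
    (d := (PySem.Dict.empty : PySem.Dict (List Char) (List String))) (c := p)
  simpa [List.foldl_map, List.filter_map, List.map_map, Function.comp_def] using h

-- dict(pares) is the left fold inserting each pair (definitional)
theorem ofList_eq_foldl_insert {ν : Type} (l : List (String × ν)) :
    PySem.Dict.ofList l = l.foldl (fun d p => d.insert p.1 p.2) PySem.Dict.empty := rfl

-- folding over a filterMap is folding with the skipped elements ignored
theorem foldl_filterMap {α β γ : Type} (l : List α) (f : α → Option β) (g : γ → β → γ) (i : γ) :
    (l.filterMap f).foldl g i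
      = l.foldl (fun acc x => match f x with | some y => g acc y | none => acc) i := by
  induction l generalizing i with
  | nil => rfl
  | cons a t ih => cases h : f a <;> simp [h, ih]

-- ===== VERDICT (by name: the statement is the Claim_ definition above) =====

theorem cria_combinacoes_spec : Claim_equal_cria_combinacoes := by
  intro d _ _
  unfold Spec_cria_combinacoes cria_combinacoes cria_combinacoes_alt
  simp only []
  apply congrArg PySem.Dict.items
  simp only [ofList_eq_foldl_insert]
  rw [List.foldl_flatMap]
  apply PySem.List.foldl_congr_mem
  intro comb v1 _
  rw [bucket_eq, foldl_filterMap]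
  rw [PySem.List.foldl_if_eq_foldl_filter (p := fun v2 => pvSuf v1 == pvPref v2)]
  have hfilter : (fun v2 => pvSuf v1 == pvPref v2) = (fun t => pvPref t == pvSuf v1) := by
    funext t
    cases h1 : pvSuf v1 == pvPref t <;> cases h2 : pvPref t == pvSuf v1 <;> simp_all
  rw [hfilter]
  apply PySem.List.foldl_congr_mem
  intro c v2 _
  cases h : PySem.Str.pyGet? v2 (-1) <;> simp [h, pvVal_eq]
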